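-- pv_equiv track=rewrite | github.com/quantAsh/futurestack | backend/services/demo_concierge.py | extract_location_from_query
-- ===== SOURCE A (Python) =====
-- from typing import List, Dict, Any, Optional
--
-- def extract_location_from_query(query: str) -> Optional[str]:
--     """Extract location mentions from query."""
--     # Map of recognized terms → search strings (lowercase)
--     locations = {
--         "lisbon": "lisbon",
--         "bali": "bali",
--         "berlin": "berlin",
--         "chiang mai": "chiang mai",
--         "mexico city": "mexico city",
--         "arizona": "arizona",
--         "ericeira": "ericeira",
--         "santa teresa": "santa teresa",
--         # Countries / regions
--         "thailand": "thailand",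
--         "portugal": "portugal",
--         "indonesia": "indonesia",
--         "mexico": "mexico",
--         "germany": "germany",
--         "costa rica": "costa rica",
--         "southeast asia": "thailand",  # proxy to our SE Asia hub
--         "south east asia": "thailand",
--         "asia": "thailand",
--     }
--     query_lower = query.lower()
--     # Prefer longer matches first (e.g. "chiang mai" before "mai")
--     for term in sorted(locations.keys(), key=len, reverse=True):
--         if term in query_lower:
--             return locations[term]
--     return None
-- ===== SOURCE B (Python) =====
-- from typing import Optional
--
-- def extract_location_from_query(query: str) -> Optional[str]:
--     """Extract location mentions from query (single pass, no sorting)."""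
--     locations = {
--         "lisbon": "lisbon",
--         "bali": "bali",
--         "berlin": "berlin",
--         "chiang mai": "chiang mai",
--         "mexico city": "mexico city",
--         "arizona": "arizona",
--         "ericeira": "ericeira",
--         "santa teresa": "santa teresa",
--         "thailand": "thailand",
--         "portugal": "portugal",
--         "indonesia": "indonesia",
--         "mexico": "mexico",
--         "germany": "germany",
--         "costa rica": "costa rica",
--         "southeast asia": "thailand",
--         "south east asia": "thailand",
--         "asia": "thailand",
--     }
--     query_lower = query.lower()
--     best = None
--     best_len = -1
--     for term, value in locations.items():
--         if term in query_lower and len(term) > best_len: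
--             best = value
--             best_len = len(term)
--     return best
-- ===== Notes on version B (the rewrite author's own statement) =====
-- stated objective: alternative
-- what changed: Replaces sort-keys-by-length-then-return-first-substring-match with a single running-max pass over the dict in insertion order, keeping the longest matching term seen so far (strict > reproduces A's stable-sort tie-break).
import Mathlib
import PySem

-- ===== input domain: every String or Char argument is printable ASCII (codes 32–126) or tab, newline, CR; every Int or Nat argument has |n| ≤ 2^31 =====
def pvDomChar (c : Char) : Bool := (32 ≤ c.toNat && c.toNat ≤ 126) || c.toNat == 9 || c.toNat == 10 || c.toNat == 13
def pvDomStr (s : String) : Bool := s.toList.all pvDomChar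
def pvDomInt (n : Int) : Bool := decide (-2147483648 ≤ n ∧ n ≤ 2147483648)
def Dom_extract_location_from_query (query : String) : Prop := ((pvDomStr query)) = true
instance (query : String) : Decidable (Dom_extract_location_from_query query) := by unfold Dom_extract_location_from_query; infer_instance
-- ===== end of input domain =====

-- B replaces A's sort-by-length-then-first-substring-match with a single running-max pass over
-- the dict in insertion order (strict > reproduces the stable sort's tie-break): an alternative
-- decomposition of the same exact behaviour, proved equal on every query.

-- The locations dict, as its insertion-ordered pair list (shared data of both programs).
def pvLocs : List (String × String) :=
  [("lisbon", "lisbon"),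
   ("bali", "bali"),
   ("berlin", "berlin"),
   ("chiang mai", "chiang mai"),
   ("mexico city", "mexico city"),
   ("arizona", "arizona"),
   ("ericeira", "ericeira"),
   ("santa teresa", "santa teresa"),
   ("thailand", "thailand"),
   ("portugal", "portugal"),
   ("indonesia", "indonesia"),
   ("mexico", "mexico"),
   ("germany", "germany"),
   ("costa rica", "costa rica"),
   ("southeast asia", "thailand"),
   ("south east asia", "thailand"),
   ("asia", "thailand")]

-- ===== PORT A =====
-- for term in sorted(locations.keys(), key=len, reverse=True): if term in query_lower: return locations[term]
-- (locations[term] is transliterated as get?; the key always comes from locations.keys(), so the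
--  KeyError branch, ported as none, is unreachable)
def pvLookupA (ql : String) (locations : PySem.Dict String String) : List String → Option String
  | [] => none
  | t :: rest =>
    if PySem.Str.isIn t ql = true then
      match PySem.Dict.get? locations t with
      | some v => some v
      | none => none
    else pvLookupA ql locations rest

def extract_location_from_query (query : String) : Option String :=
  let locations : PySem.Dict String String := PySem.Dict.ofList pvLocs
  let query_lower := PySem.Str.lower query
  pvLookupA query_lower locations
    (PySem.List.sorted locations.keys (fun t => PySem.Str.len t) true)

-- ===== PORT B =====
-- if term in query_lower and len(term) > best_len: best, best_len = value, len(term)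
def pvStep (ql : String) (st : Option String × Int) (p : String × String) : Option String × Int :=
  if PySem.Str.isIn p.1 ql = true ∧ st.2 < (PySem.Str.len p.1 : Int) then
    (some p.2, (PySem.Str.len p.1 : Int))
  else st

def extract_location_from_query_alt (query : String) : Option String :=
  let query_lower := PySem.Str.lower query
  (pvLocs.foldl (pvStep query_lower) (none, -1)).1

-- ===== PRECONDITION & SPEC =====
def Spec_extract_location_from_query (query : String) (out : Option String) : Prop := out = extract_location_from_query_alt query
instance (query : String) (out : Option String) : Decidable (Spec_extract_location_from_query query out) := by unfold Spec_extract_location_from_query; infer_instance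

-- ===== CLAIM (what is proved, stated in full; the proofs are below) =====
def Claim_equal_extract_location_from_query : Prop := ∀ (query : String), Dom_extract_location_from_query query → Spec_extract_location_from_query query (extract_location_from_query query)

-- ===== LEMMAS AND PROOFS =====

-- First value of a matching term along a pair list (the shape A's loop takes after the
-- sorted key list and the dict lookups are evaluated).
def pvMatchFirst (ql : String) : List (String × String) → Option String
  | [] => none
  | p :: r => if PySem.Str.isIn p.1 ql = true then some p.2 else pvMatchFirst ql r

-- 'S is the stable length-descending rearrangement of L': each step peels the head of S out of
-- L, everything to its left in L being strictly shorter and everything else no longer.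
inductive pvSortedOf : List (String × String) → List (String × String) → Prop
  | nil : pvSortedOf [] []
  | cons (t v : String) (L₁ L₂ S' : List (String × String))
      (h₁ : ∀ p ∈ L₁, (PySem.Str.len p.1 : Int) < (PySem.Str.len t : Int))
      (h₂ : ∀ p ∈ L₂, (PySem.Str.len p.1 : Int) ≤ (PySem.Str.len t : Int))
      (hS : pvSortedOf S' (L₁ ++ L₂)) :
      pvSortedOf ((t, v) :: S') (L₁ ++ (t, v) :: L₂)

theorem pvFold_bound (ql : String) (L : List (String × String)) (c : Int) :
    ∀ st : Option String × Int, st.2 < c → (∀ p ∈ L, (PySem.Str.len p.1 : Int) < c) →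
    (L.foldl (pvStep ql) st).2 < c := by
  induction L with
  | nil => intro st h _; simpa using h
  | cons p L ih =>
    intro st hst hL
    simp only [List.foldl_cons]
    refine ih _ ?_ (fun q hq => hL q (List.mem_cons_of_mem _ hq))
    unfold pvStep
    split
    · exact hL p (List.mem_cons_self)
    · exact hst

theorem pvFold_skip (ql : String) (L : List (String × String)) :
    ∀ st : Option String × Int, (∀ p ∈ L, (PySem.Str.len p.1 : Int) ≤ st.2) →
    L.foldl (pvStep ql) st = st := by
  induction L with
  | nil => intro st _; rfl
  | cons p L ih =>
    intro st hL
    have hp : ¬ ((PySem.Str.isIn p.1 ql = true) ∧ st.2 < (PySem.Str.len p.1 : Int)) := by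
      rintro ⟨-, hlt⟩
      exact absurd (hL p (List.mem_cons_self)) (not_le.mpr hlt)
    simp only [List.foldl_cons, pvStep, if_neg hp]
    exact ih st (fun q hq => hL q (List.mem_cons_of_mem _ hq))

theorem pvFold_eq_matchFirst (ql : String) (S L : List (String × String)) (h : pvSortedOf S L) :
    ∀ st : Option String × Int, (∀ p ∈ L, st.2 < (PySem.Str.len p.1 : Int)) →
    (L.foldl (pvStep ql) st).1 = ((pvMatchFirst ql S).elim st.1 some) := by
  induction h with
  | nil => intro st _; simp [pvMatchFirst]
  | cons t v L₁ L₂ S' h₁ h₂ hS ih =>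
    intro st hst
    have htL : (t, v) ∈ L₁ ++ (t, v) :: L₂ := by simp
    by_cases hm : PySem.Str.isIn t ql = true
    · have hb : (L₁.foldl (pvStep ql) st).2 < (PySem.Str.len t : Int) :=
        pvFold_bound ql L₁ _ st (hst _ htL)
          (fun p hp => h₁ p hp)
      rw [List.foldl_append, List.foldl_cons]
      have hstep : pvStep ql (L₁.foldl (pvStep ql) st) (t, v)
          = (some v, (PySem.Str.len t : Int)) := by
        unfold pvStep; exact if_pos ⟨hm, hb⟩
      rw [hstep, pvFold_skip ql L₂ _ (fun p hp => h₂ p hp)]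
      simp only [pvMatchFirst, if_pos hm, Option.elim]
    · have hstep : ∀ st' : Option String × Int, pvStep ql st' (t, v) = st' := by
        intro st'; unfold pvStep
        exact if_neg (fun hc => hm hc.1)
      have hfold : (L₁ ++ (t, v) :: L₂).foldl (pvStep ql) st
          = (L₁ ++ L₂).foldl (pvStep ql) st := by
        rw [List.foldl_append, List.foldl_cons, hstep, ← List.foldl_append]
      rw [hfold, ih st (fun p hp => hst p (by
        rcases List.mem_append.mp hp with h' | h'
        · exact List.mem_append.mpr (Or.inl h')
        · exact List.mem_append.mpr (Or.inr (List.mem_cons_of_mem _ h'))))]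
      simp only [pvMatchFirst, if_neg hm]

-- The concrete sortedness certificate for the locations list.
theorem pvSortedOf_locs :
    pvSortedOf
      [("south east asia", "thailand"), ("southeast asia", "thailand"), ("santa teresa", "santa teresa"), ("mexico city", "mexico city"), ("chiang mai", "chiang mai"), ("costa rica", "costa rica"), ("indonesia", "indonesia"), ("ericeira", "ericeira"), ("thailand", "thailand"), ("portugal", "portugal"), ("arizona", "arizona"), ("germany", "germany"), ("lisbon", "lisbon"), ("berlin", "berlin"), ("mexico", "mexico"), ("bali", "bali"), ("asia", "thailand")]
      pvLocs := by
  have h17 : pvSortedOf [] [] := pvSortedOf.nil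
  have h16 : pvSortedOf [("asia", "thailand")] [("asia", "thailand")] :=
    pvSortedOf.cons "asia" "thailand" [] [] [] (by decide) (by decide) h17
  have h15 : pvSortedOf [("bali", "bali"), ("asia", "thailand")] [("bali", "bali"), ("asia", "thailand")] :=
    pvSortedOf.cons "bali" "bali" [] [("asia", "thailand")] [("asia", "thailand")] (by decide) (by decide) h16
  have h14 : pvSortedOf [("mexico", "mexico"), ("bali", "bali"), ("asia", "thailand")] [("bali", "bali"), ("mexico", "mexico"), ("asia", "thailand")] :=
    pvSortedOf.cons "mexico" "mexico" [("bali", "bali")] [("asia", "thailand")] [("bali", "bali"), ("asia", "thailand")] (by decide) (by decide) h15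
  have h13 : pvSortedOf [("berlin", "berlin"), ("mexico", "mexico"), ("bali", "bali"), ("asia", "thailand")] [("bali", "bali"), ("berlin", "berlin"), ("mexico", "mexico"), ("asia", "thailand")] :=
    pvSortedOf.cons "berlin" "berlin" [("bali", "bali")] [("mexico", "mexico"), ("asia", "thailand")] [("mexico", "mexico"), ("bali", "bali"), ("asia", "thailand")] (by decide) (by decide) h14
  have h12 : pvSortedOf [("lisbon", "lisbon"), ("berlin", "berlin"), ("mexico", "mexico"), ("bali", "bali"), ("asia", "thailand")] [("lisbon", "lisbon"), ("bali", "bali"), ("berlin", "berlin"), ("mexico", "mexico"), ("asia", "thailand")] :=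
    pvSortedOf.cons "lisbon" "lisbon" [] [("bali", "bali"), ("berlin", "berlin"), ("mexico", "mexico"), ("asia", "thailand")] [("berlin", "berlin"), ("mexico", "mexico"), ("bali", "bali"), ("asia", "thailand")] (by decide) (by decide) h13
  have h11 : pvSortedOf [("germany", "germany"), ("lisbon", "lisbon"), ("berlin", "berlin"), ("mexico", "mexico"), ("bali", "bali"), ("asia", "thailand")] [("lisbon", "lisbon"), ("bali", "bali"), ("berlin", "berlin"), ("mexico", "mexico"), ("germany", "germany"), ("asia", "thailand")] :=
    pvSortedOf.cons "germany" "germany" [("lisbon", "lisbon"), ("bali", "bali"), ("berlin", "berlin"), ("mexico", "mexico")] [("asia", "thailand")] [("lisbon", "lisbon"), ("berlin", "berlin"), ("mexico", "mexico"), ("bali", "bali"), ("asia", "thailand")] (by decide) (by decide) h12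
  have h10 : pvSortedOf [("arizona", "arizona"), ("germany", "germany"), ("lisbon", "lisbon"), ("berlin", "berlin"), ("mexico", "mexico"), ("bali", "bali"), ("asia", "thailand")] [("lisbon", "lisbon"), ("bali", "bali"), ("berlin", "berlin"), ("arizona", "arizona"), ("mexico", "mexico"), ("germany", "germany"), ("asia", "thailand")] :=
    pvSortedOf.cons "arizona" "arizona" [("lisbon", "lisbon"), ("bali", "bali"), ("berlin", "berlin")] [("mexico", "mexico"), ("germany", "germany"), ("asia", "thailand")] [("germany", "germany"), ("lisbon", "lisbon"), ("berlin", "berlin"), ("mexico", "mexico"), ("bali", "bali"), ("asia", "thailand")] (by decide) (by decide) h11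
  have h9 : pvSortedOf [("portugal", "portugal"), ("arizona", "arizona"), ("germany", "germany"), ("lisbon", "lisbon"), ("berlin", "berlin"), ("mexico", "mexico"), ("bali", "bali"), ("asia", "thailand")] [("lisbon", "lisbon"), ("bali", "bali"), ("berlin", "berlin"), ("arizona", "arizona"), ("portugal", "portugal"), ("mexico", "mexico"), ("germany", "germany"), ("asia", "thailand")] :=
    pvSortedOf.cons "portugal" "portugal" [("lisbon", "lisbon"), ("bali", "bali"), ("berlin", "berlin"), ("arizona", "arizona")] [("mexico", "mexico"), ("germany", "germany"), ("asia", "thailand")] [("arizona", "arizona"), ("germany", "germany"), ("lisbon", "lisbon"), ("berlin", "berlin"), ("mexico", "mexico"), ("bali", "bali"), ("asia", "thailand")] (by decide) (by decide) h10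
  have h8 : pvSortedOf [("thailand", "thailand"), ("portugal", "portugal"), ("arizona", "arizona"), ("germany", "germany"), ("lisbon", "lisbon"), ("berlin", "berlin"), ("mexico", "mexico"), ("bali", "bali"), ("asia", "thailand")] [("lisbon", "lisbon"), ("bali", "bali"), ("berlin", "berlin"), ("arizona", "arizona"), ("thailand", "thailand"), ("portugal", "portugal"), ("mexico", "mexico"), ("germany", "germany"), ("asia", "thailand")] :=
    pvSortedOf.cons "thailand" "thailand" [("lisbon", "lisbon"), ("bali", "bali"), ("berlin", "berlin"), ("arizona", "arizona")] [("portugal", "portugal"), ("mexico", "mexico"), ("germany", "germany"), ("asia", "thailand")] [("portugal", "portugal"), ("arizona", "arizona"), ("germany", "germany"), ("lisbon", "lisbon"), ("berlin", "berlin"), ("mexico", "mexico"), ("bali", "bali"), ("asia", "thailand")] (by decide) (by decide) h9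
  have h7 : pvSortedOf [("ericeira", "ericeira"), ("thailand", "thailand"), ("portugal", "portugal"), ("arizona", "arizona"), ("germany", "germany"), ("lisbon", "lisbon"), ("berlin", "berlin"), ("mexico", "mexico"), ("bali", "bali"), ("asia", "thailand")] [("lisbon", "lisbon"), ("bali", "bali"), ("berlin", "berlin"), ("arizona", "arizona"), ("ericeira", "ericeira"), ("thailand", "thailand"), ("portugal", "portugal"), ("mexico", "mexico"), ("germany", "germany"), ("asia", "thailand")] :=
    pvSortedOf.cons "ericeira" "ericeira" [("lisbon", "lisbon"), ("bali", "bali"), ("berlin", "berlin"), ("arizona", "arizona")] [("thailand", "thailand"), ("portugal", "portugal"), ("mexico", "mexico"), ("germany", "germany"), ("asia", "thailand")] [("thailand", "thailand"), ("portugal", "portugal"), ("arizona", "arizona"), ("germany", "germany"), ("lisbon", "lisbon"), ("berlin", "berlin"), ("mexico", "mexico"), ("bali", "bali"), ("asia", "thailand")] (by decide) (by decide) h8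
  have h6 : pvSortedOf [("indonesia", "indonesia"), ("ericeira", "ericeira"), ("thailand", "thailand"), ("portugal", "portugal"), ("arizona", "arizona"), ("germany", "germany"), ("lisbon", "lisbon"), ("berlin", "berlin"), ("mexico", "mexico"), ("bali", "bali"), ("asia", "thailand")] [("lisbon", "lisbon"), ("bali", "bali"), ("berlin", "berlin"), ("arizona", "arizona"), ("ericeira", "ericeira"), ("thailand", "thailand"), ("portugal", "portugal"), ("indonesia", "indonesia"), ("mexico", "mexico"), ("germany", "germany"), ("asia", "thailand")] :=
    pvSortedOf.cons "indonesia" "indonesia" [("lisbon", "lisbon"), ("bali", "bali"), ("berlin", "berlin"), ("arizona", "arizona"), ("ericeira", "ericeira"), ("thailand", "thailand"), ("portugal", "portugal")] [("mexico", "mexico"), ("germany", "germany"), ("asia", "thailand")] [("ericeira", "ericeira"), ("thailand", "thailand"), ("portugal", "portugal"), ("arizona", "arizona"), ("germany", "germany"), ("lisbon", "lisbon"), ("berlin", "berlin"), ("mexico", "mexico"), ("bali", "bali"), ("asia", "thailand")] (by decide) (by decide) h7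
  have h5 : pvSortedOf [("costa rica", "costa rica"), ("indonesia", "indonesia"), ("ericeira", "ericeira"), ("thailand", "thailand"), ("portugal", "portugal"), ("arizona", "arizona"), ("germany", "germany"), ("lisbon", "lisbon"), ("berlin", "berlin"), ("mexico", "mexico"), ("bali", "bali"), ("asia", "thailand")] [("lisbon", "lisbon"), ("bali", "bali"), ("berlin", "berlin"), ("arizona", "arizona"), ("ericeira", "ericeira"), ("thailand", "thailand"), ("portugal", "portugal"), ("indonesia", "indonesia"), ("mexico", "mexico"), ("germany", "germany"), ("costa rica", "costa rica"), ("asia", "thailand")] :=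
    pvSortedOf.cons "costa rica" "costa rica" [("lisbon", "lisbon"), ("bali", "bali"), ("berlin", "berlin"), ("arizona", "arizona"), ("ericeira", "ericeira"), ("thailand", "thailand"), ("portugal", "portugal"), ("indonesia", "indonesia"), ("mexico", "mexico"), ("germany", "germany")] [("asia", "thailand")] [("indonesia", "indonesia"), ("ericeira", "ericeira"), ("thailand", "thailand"), ("portugal", "portugal"), ("arizona", "arizona"), ("germany", "germany"), ("lisbon", "lisbon"), ("berlin", "berlin"), ("mexico", "mexico"), ("bali", "bali"), ("asia", "thailand")] (by decide) (by decide) h6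
  have h4 : pvSortedOf [("chiang mai", "chiang mai"), ("costa rica", "costa rica"), ("indonesia", "indonesia"), ("ericeira", "ericeira"), ("thailand", "thailand"), ("portugal", "portugal"), ("arizona", "arizona"), ("germany", "germany"), ("lisbon", "lisbon"), ("berlin", "berlin"), ("mexico", "mexico"), ("bali", "bali"), ("asia", "thailand")] [("lisbon", "lisbon"), ("bali", "bali"), ("berlin", "berlin"), ("chiang mai", "chiang mai"), ("arizona", "arizona"), ("ericeira", "ericeira"), ("thailand", "thailand"), ("portugal", "portugal"), ("indonesia", "indonesia"), ("mexico", "mexico"), ("germany", "germany"), ("costa rica", "costa rica"), ("asia", "thailand")] :=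
    pvSortedOf.cons "chiang mai" "chiang mai" [("lisbon", "lisbon"), ("bali", "bali"), ("berlin", "berlin")] [("arizona", "arizona"), ("ericeira", "ericeira"), ("thailand", "thailand"), ("portugal", "portugal"), ("indonesia", "indonesia"), ("mexico", "mexico"), ("germany", "germany"), ("costa rica", "costa rica"), ("asia", "thailand")] [("costa rica", "costa rica"), ("indonesia", "indonesia"), ("ericeira", "ericeira"), ("thailand", "thailand"), ("portugal", "portugal"), ("arizona", "arizona"), ("germany", "germany"), ("lisbon", "lisbon"), ("berlin", "berlin"), ("mexico", "mexico"), ("bali", "bali"), ("asia", "thailand")] (by decide) (by decide) h5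
  have h3 : pvSortedOf [("mexico city", "mexico city"), ("chiang mai", "chiang mai"), ("costa rica", "costa rica"), ("indonesia", "indonesia"), ("ericeira", "ericeira"), ("thailand", "thailand"), ("portugal", "portugal"), ("arizona", "arizona"), ("germany", "germany"), ("lisbon", "lisbon"), ("berlin", "berlin"), ("mexico", "mexico"), ("bali", "bali"), ("asia", "thailand")] [("lisbon", "lisbon"), ("bali", "bali"), ("berlin", "berlin"), ("chiang mai", "chiang mai"), ("mexico city", "mexico city"), ("arizona", "arizona"), ("ericeira", "ericeira"), ("thailand", "thailand"), ("portugal", "portugal"), ("indonesia", "indonesia"), ("mexico", "mexico"), ("germany", "germany"), ("costa rica", "costa rica"), ("asia", "thailand")] :=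
    pvSortedOf.cons "mexico city" "mexico city" [("lisbon", "lisbon"), ("bali", "bali"), ("berlin", "berlin"), ("chiang mai", "chiang mai")] [("arizona", "arizona"), ("ericeira", "ericeira"), ("thailand", "thailand"), ("portugal", "portugal"), ("indonesia", "indonesia"), ("mexico", "mexico"), ("germany", "germany"), ("costa rica", "costa rica"), ("asia", "thailand")] [("chiang mai", "chiang mai"), ("costa rica", "costa rica"), ("indonesia", "indonesia"), ("ericeira", "ericeira"), ("thailand", "thailand"), ("portugal", "portugal"), ("arizona", "arizona"), ("germany", "germany"), ("lisbon", "lisbon"), ("berlin", "berlin"), ("mexico", "mexico"), ("bali", "bali"), ("asia", "thailand")] (by decide) (by decide) h4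
  have h2 : pvSortedOf [("santa teresa", "santa teresa"), ("mexico city", "mexico city"), ("chiang mai", "chiang mai"), ("costa rica", "costa rica"), ("indonesia", "indonesia"), ("ericeira", "ericeira"), ("thailand", "thailand"), ("portugal", "portugal"), ("arizona", "arizona"), ("germany", "germany"), ("lisbon", "lisbon"), ("berlin", "berlin"), ("mexico", "mexico"), ("bali", "bali"), ("asia", "thailand")] [("lisbon", "lisbon"), ("bali", "bali"), ("berlin", "berlin"), ("chiang mai", "chiang mai"), ("mexico city", "mexico city"), ("arizona", "arizona"), ("ericeira", "ericeira"), ("santa teresa", "santa teresa"), ("thailand", "thailand"), ("portugal", "portugal"), ("indonesia", "indonesia"), ("mexico", "mexico"), ("germany", "germany"), ("costa rica", "costa rica"), ("asia", "thailand")] :=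
    pvSortedOf.cons "santa teresa" "santa teresa" [("lisbon", "lisbon"), ("bali", "bali"), ("berlin", "berlin"), ("chiang mai", "chiang mai"), ("mexico city", "mexico city"), ("arizona", "arizona"), ("ericeira", "ericeira")] [("thailand", "thailand"), ("portugal", "portugal"), ("indonesia", "indonesia"), ("mexico", "mexico"), ("germany", "germany"), ("costa rica", "costa rica"), ("asia", "thailand")] [("mexico city", "mexico city"), ("chiang mai", "chiang mai"), ("costa rica", "costa rica"), ("indonesia", "indonesia"), ("ericeira", "ericeira"), ("thailand", "thailand"), ("portugal", "portugal"), ("arizona", "arizona"), ("germany", "germany"), ("lisbon", "lisbon"), ("berlin", "berlin"), ("mexico", "mexico"), ("bali", "bali"), ("asia", "thailand")] (by decide) (by decide) h3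
  have h1 : pvSortedOf [("southeast asia", "thailand"), ("santa teresa", "santa teresa"), ("mexico city", "mexico city"), ("chiang mai", "chiang mai"), ("costa rica", "costa rica"), ("indonesia", "indonesia"), ("ericeira", "ericeira"), ("thailand", "thailand"), ("portugal", "portugal"), ("arizona", "arizona"), ("germany", "germany"), ("lisbon", "lisbon"), ("berlin", "berlin"), ("mexico", "mexico"), ("bali", "bali"), ("asia", "thailand")] [("lisbon", "lisbon"), ("bali", "bali"), ("berlin", "berlin"), ("chiang mai", "chiang mai"), ("mexico city", "mexico city"), ("arizona", "arizona"), ("ericeira", "ericeira"), ("santa teresa", "santa teresa"), ("thailand", "thailand"), ("portugal", "portugal"), ("indonesia", "indonesia"), ("mexico", "mexico"), ("germany", "germany"), ("costa rica", "costa rica"), ("southeast asia", "thailand"), ("asia", "thailand")] :=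
    pvSortedOf.cons "southeast asia" "thailand" [("lisbon", "lisbon"), ("bali", "bali"), ("berlin", "berlin"), ("chiang mai", "chiang mai"), ("mexico city", "mexico city"), ("arizona", "arizona"), ("ericeira", "ericeira"), ("santa teresa", "santa teresa"), ("thailand", "thailand"), ("portugal", "portugal"), ("indonesia", "indonesia"), ("mexico", "mexico"), ("germany", "germany"), ("costa rica", "costa rica")] [("asia", "thailand")] [("santa teresa", "santa teresa"), ("mexico city", "mexico city"), ("chiang mai", "chiang mai"), ("costa rica", "costa rica"), ("indonesia", "indonesia"), ("ericeira", "ericeira"), ("thailand", "thailand"), ("portugal", "portugal"), ("arizona", "arizona"), ("germany", "germany"), ("lisbon", "lisbon"), ("berlin", "berlin"), ("mexico", "mexico"), ("bali", "bali"), ("asia", "thailand")] (by decide) (by decide) h2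
  have h0 : pvSortedOf [("south east asia", "thailand"), ("southeast asia", "thailand"), ("santa teresa", "santa teresa"), ("mexico city", "mexico city"), ("chiang mai", "chiang mai"), ("costa rica", "costa rica"), ("indonesia", "indonesia"), ("ericeira", "ericeira"), ("thailand", "thailand"), ("portugal", "portugal"), ("arizona", "arizona"), ("germany", "germany"), ("lisbon", "lisbon"), ("berlin", "berlin"), ("mexico", "mexico"), ("bali", "bali"), ("asia", "thailand")] [("lisbon", "lisbon"), ("bali", "bali"), ("berlin", "berlin"), ("chiang mai", "chiang mai"), ("mexico city", "mexico city"), ("arizona", "arizona"), ("ericeira", "ericeira"), ("santa teresa", "santa teresa"), ("thailand", "thailand"), ("portugal", "portugal"), ("indonesia", "indonesia"), ("mexico", "mexico"), ("germany", "germany"), ("costa rica", "costa rica"), ("southeast asia", "thailand"), ("south east asia", "thailand"), ("asia", "thailand")] :=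
    pvSortedOf.cons "south east asia" "thailand" [("lisbon", "lisbon"), ("bali", "bali"), ("berlin", "berlin"), ("chiang mai", "chiang mai"), ("mexico city", "mexico city"), ("arizona", "arizona"), ("ericeira", "ericeira"), ("santa teresa", "santa teresa"), ("thailand", "thailand"), ("portugal", "portugal"), ("indonesia", "indonesia"), ("mexico", "mexico"), ("germany", "germany"), ("costa rica", "costa rica"), ("southeast asia", "thailand")] [("asia", "thailand")] [("southeast asia", "thailand"), ("santa teresa", "santa teresa"), ("mexico city", "mexico city"), ("chiang mai", "chiang mai"), ("costa rica", "costa rica"), ("indonesia", "indonesia"), ("ericeira", "ericeira"), ("thailand", "thailand"), ("portugal", "portugal"), ("arizona", "arizona"), ("germany", "germany"), ("lisbon", "lisbon"), ("berlin", "berlin"), ("mexico", "mexico"), ("bali", "bali"), ("asia", "thailand")] (by decide) (by decide) h1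
  exact h0

-- Evaluating A's sorted key list (stable insertion sort of a closed list).
theorem pvSortedKeys_eval :
    PySem.List.sorted (PySem.Dict.ofList pvLocs).keys (fun t => PySem.Str.len t) true
      = ["south east asia", "southeast asia", "santa teresa", "mexico city", "chiang mai", "costa rica", "indonesia", "ericeira", "thailand", "portugal", "arizona", "germany", "lisbon", "berlin", "mexico", "bali", "asia"] := by decide

-- A's loop over the sorted keys, with the dict lookups evaluated, is pvMatchFirst on the
-- sorted pair list (same conditions in the same order; the leaves are closed lookups).
theorem pvLookupA_eval (ql : String) :
    pvLookupA ql (PySem.Dict.ofList pvLocs) ["south east asia", "southeast asia", "santa teresa", "mexico city", "chiang mai", "costa rica", "indonesia", "ericeira", "thailand", "portugal", "arizona", "germany", "lisbon", "berlin", "mexico", "bali", "asia"]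
      = pvMatchFirst ql
      [("south east asia", "thailand"), ("southeast asia", "thailand"), ("santa teresa", "santa teresa"), ("mexico city", "mexico city"), ("chiang mai", "chiang mai"), ("costa rica", "costa rica"), ("indonesia", "indonesia"), ("ericeira", "ericeira"), ("thailand", "thailand"), ("portugal", "portugal"), ("arizona", "arizona"), ("germany", "germany"), ("lisbon", "lisbon"), ("berlin", "berlin"), ("mexico", "mexico"), ("bali", "bali"), ("asia", "thailand")] := by
  have g0 : PySem.Dict.get? (PySem.Dict.ofList pvLocs) "south east asia" = some "thailand" := by decide
  have g1 : PySem.Dict.get? (PySem.Dict.ofList pvLocs) "southeast asia" = some "thailand" := by decide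
  have g2 : PySem.Dict.get? (PySem.Dict.ofList pvLocs) "santa teresa" = some "santa teresa" := by decide
  have g3 : PySem.Dict.get? (PySem.Dict.ofList pvLocs) "mexico city" = some "mexico city" := by decide
  have g4 : PySem.Dict.get? (PySem.Dict.ofList pvLocs) "chiang mai" = some "chiang mai" := by decide
  have g5 : PySem.Dict.get? (PySem.Dict.ofList pvLocs) "costa rica" = some "costa rica" := by decide
  have g6 : PySem.Dict.get? (PySem.Dict.ofList pvLocs) "indonesia" = some "indonesia" := by decide
  have g7 : PySem.Dict.get? (PySem.Dict.ofList pvLocs) "ericeira" = some "ericeira" := by decide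
  have g8 : PySem.Dict.get? (PySem.Dict.ofList pvLocs) "thailand" = some "thailand" := by decide
  have g9 : PySem.Dict.get? (PySem.Dict.ofList pvLocs) "portugal" = some "portugal" := by decide
  have g10 : PySem.Dict.get? (PySem.Dict.ofList pvLocs) "arizona" = some "arizona" := by decide
  have g11 : PySem.Dict.get? (PySem.Dict.ofList pvLocs) "germany" = some "germany" := by decide
  have g12 : PySem.Dict.get? (PySem.Dict.ofList pvLocs) "lisbon" = some "lisbon" := by decide
  have g13 : PySem.Dict.get? (PySem.Dict.ofList pvLocs) "berlin" = some "berlin" := by decide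
  have g14 : PySem.Dict.get? (PySem.Dict.ofList pvLocs) "mexico" = some "mexico" := by decide
  have g15 : PySem.Dict.get? (PySem.Dict.ofList pvLocs) "bali" = some "bali" := by decide
  have g16 : PySem.Dict.get? (PySem.Dict.ofList pvLocs) "asia" = some "thailand" := by decide
  simp only [pvLookupA, pvMatchFirst, g0, g1, g2, g3, g4, g5, g6, g7, g8, g9, g10, g11, g12, g13, g14, g15, g16]

-- ===== VERDICT (by name: the statement is the Claim_ definition above) =====
theorem extract_location_from_query_spec : Claim_equal_extract_location_from_query := by
  intro query _
  unfold Spec_extract_location_from_query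
  unfold extract_location_from_query extract_location_from_query_alt
  show pvLookupA (PySem.Str.lower query) (PySem.Dict.ofList pvLocs)
      (PySem.List.sorted (PySem.Dict.ofList pvLocs).keys (fun t => PySem.Str.len t) true)
    = (pvLocs.foldl (pvStep (PySem.Str.lower query)) (none, -1)).1
  rw [pvSortedKeys_eval, pvLookupA_eval,
    pvFold_eq_matchFirst (PySem.Str.lower query) _ pvLocs pvSortedOf_locs (none, -1)
      (by intro p hp; fin_cases hp <;> decide)]
  cases pvMatchFirst (PySem.Str.lower query) _ <;> rfl
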